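-- pv_equiv track=rewrite | github.com/blackjackal982/Mission-RND | mocktest2_problem1.py | transform
-- ===== SOURCE A (Python) =====
-- import string
--
-- valid_words = string.ascii_uppercase+string.ascii_lowercase+" "
--
-- def count_vowel(text):
--     vowels ="aeiou"
--     count = 0
--     for i in text.lower():
--         if i in vowels:
--             count+=1
--     return count
--
-- def transform(sentence):
--     if type(sentence).__name__!='str':
--         raise TypeError
--     for i in sentence:
--         if i not in valid_words:
--             raise ValueError
--     sentence = sentence.strip()
--     word_list = sentence.split(" ")
--     word_list.sort()
--     word_list.sort(key = lambda x:count_vowel(x))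
--     word_list.sort(key = lambda x:len(x),reverse=True)
--     text = " ".join(word_list)
--     return text.strip()
-- ===== SOURCE B (Python) =====
-- import string
--
-- valid_words = string.ascii_uppercase + string.ascii_lowercase + " "
--
--
-- def count_vowel(text):
--     vowels = "aeiou"
--     count = 0
--     for i in text.lower():
--         if i in vowels:
--             count += 1
--     return count
--
--
-- def precedes(x, y):
--     # strict 'x comes before y': longer first, then fewer vowels, then alphabetical
--     if x[0] != y[0]:
--         return x[0] > y[0]
--     if x[1] != y[1]:
--         return x[1] < y[1]
--     return x[2] < y[2]
--
--
-- def transform(sentence):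
--     if type(sentence).__name__ != 'str':
--         raise TypeError
--     for i in sentence:
--         if i not in valid_words:
--             raise ValueError
--     # Decorate each word once with (length, vowel count), then build the output
--     # by repeatedly extracting the minimal tuple (selection), then undecorate.
--     items = [(len(w), count_vowel(w), w) for w in sentence.strip().split(" ")]
--     result = []
--     while items:
--         best = items[0]
--         for t in items[1:]:
--             if precedes(t, best):
--                 best = t
--         items.remove(best)
--         result.append(best[2])
--     return " ".join(result).strip()
-- ===== Notes on version B (the rewrite author's own statement) =====
-- stated objective: alternative
-- what changed: A's three successive stable library sorts are replaced by a decorate-select-undecorate scheme: each word is decorated once with its (length, vowel count), the output is built by repeatedly extracting the minimal remaining tuple under the order longer-first / fewer-vowels / alphabetical (a hand-written selection, no library sort), then undecorated.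
import Mathlib
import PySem

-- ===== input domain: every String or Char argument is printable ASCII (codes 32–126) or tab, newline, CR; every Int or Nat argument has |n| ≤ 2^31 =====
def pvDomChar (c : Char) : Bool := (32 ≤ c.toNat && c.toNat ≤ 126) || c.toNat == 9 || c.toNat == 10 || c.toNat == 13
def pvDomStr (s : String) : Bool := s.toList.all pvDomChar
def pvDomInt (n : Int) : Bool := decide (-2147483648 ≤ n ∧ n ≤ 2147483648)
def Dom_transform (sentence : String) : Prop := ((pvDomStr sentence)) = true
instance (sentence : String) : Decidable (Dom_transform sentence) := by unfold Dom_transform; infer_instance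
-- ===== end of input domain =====

-- B replaces A's three successive stable sorts by decorate-select-undecorate: words are
-- decorated once with (length, vowel count) and the output is built by repeated minimal-tuple
-- extraction (hand-written selection, no library sort) — an alternative algorithm, same values.


-- ===== PORT A =====
-- valid_words = string.ascii_uppercase + string.ascii_lowercase + " "
def pvValidWords : List Char := "ABCDEFGHIJKLMNOPQRSTUVWXYZabcdefghijklmnopqrstuvwxyz ".toList

-- count_vowel (identical in both sources): for i in text.lower(): if i in vowels: count += 1
def countVowel (text : String) : Int :=
  (PySem.Str.lower text).toList.foldl
    (fun count i => if ("aeiou".toList).contains i then count + 1 else count) 0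

def transform (sentence : String) : String :=
  -- 'for i in sentence: if i not in valid_words: raise ValueError' — the raising
  -- inputs are excluded by Pre_transform; the port returns "" there.
  if sentence.toList.all (fun i => pvValidWords.contains i) then
    let s := PySem.Str.strip sentence
    match PySem.Str.split? s " " with
    | some wordList =>
        let l1 := PySem.List.sorted wordList (fun x => x)                 -- word_list.sort()
        let l2 := PySem.List.sorted l1 (fun x => countVowel x)           -- sort(key=count_vowel)
        let l3 := PySem.List.sorted l2 (fun x => PySem.Str.len x) true   -- sort(key=len, reverse=True)
        PySem.Str.strip (PySem.Str.join " " l3)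
    | none => ""  -- unreachable: the separator " " is non-empty
  else ""

-- ===== PORT B =====
-- precedes(x, y): strict 'x before y' on decorated tuples
def pvPrecedes (x y : Int × Int × String) : Bool :=
  if x.1 ≠ y.1 then decide (y.1 < x.1)
  else if x.2.1 ≠ y.2.1 then decide (x.2.1 < y.2.1)
  else decide (x.2.2 < y.2.2)

-- the decoration (len(w), count_vowel(w), w)
def pvDec (w : String) : Int × Int × String := (PySem.Str.len w, countVowel w, w)

-- the inner 'for t in items[1:]: if precedes(t, best): best = t'
def pvBest (t : Int × Int × String) (rest : List (Int × Int × String)) : Int × Int × String :=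
  rest.foldl (fun b x => if pvPrecedes x b then x else b) t

theorem pvBest_mem (t : Int × Int × String) (rest : List (Int × Int × String)) :
    pvBest t rest ∈ t :: rest := by
  induction rest generalizing t with
  | nil => simp [pvBest]
  | cons y ys ih =>
    have e : pvBest t (y :: ys) = pvBest (if pvPrecedes y t then y else t) ys := rfl
    rw [e]
    rcases List.mem_cons.mp (ih (if pvPrecedes y t then y else t)) with h | h
    · rw [h]; split_ifs <;> simp
    · simp [h]

-- while items: scan for the best tuple, remove it, emit its word
def pvSelect (items : List (Int × Int × String)) : List String :=
  match items with
  | [] => []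
  | t :: rest =>
    let best := pvBest t rest
    best.2.2 :: pvSelect ((t :: rest).erase best)
termination_by items.length
decreasing_by
  have h := List.length_erase_of_mem (pvBest_mem t rest)
  simp only [h]; simp

def transform_alt (sentence : String) : String :=
  if sentence.toList.all (fun i => pvValidWords.contains i) then
    let words := match PySem.Str.split? (PySem.Str.strip sentence) " " with
                 | some ws => ws
                 | none => []  -- unreachable: the separator " " is non-empty
    let items := words.map pvDec
    PySem.Str.strip (PySem.Str.join " " (pvSelect items))
  else ""  -- ValueError; excluded by Pre_transform

-- ===== PRECONDITION & SPEC =====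
-- Python A raises ValueError exactly when some character is not a letter or space
-- (and TypeError never, the argument being a str): Pre_ is A's return domain.
def Pre_transform (sentence : String) : Prop :=
  sentence.toList.all (fun c => pvValidWords.contains c) = true
instance (sentence : String) : Decidable (Pre_transform sentence) := by
  unfold Pre_transform; infer_instance

def pvWitness_transform : String := "He is a boy"

def Spec_transform (sentence : String) (out : String) : Prop := out = transform_alt sentence
instance (sentence : String) (out : String) : Decidable (Spec_transform sentence out) := by unfold Spec_transform; infer_instance

-- ===== CLAIM (what is proved, stated in full; the proofs are below) =====
def Claim_equal_transform : Prop := ∀ (sentence : String), Dom_transform sentence → Pre_transform sentence → Spec_transform sentence (transform sentence)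

-- ===== LEMMAS AND PROOFS =====

-- The composite order of A's three stable sorts, as a lexicographic key on words…
def pvKey3 (w : String) : Lex (Int × Lex (Int × String)) :=
  toLex (-(PySem.Str.len w), toLex (countVowel w, w))

-- …and the same order on B's decorated tuples.
def pvKeyT (t : Int × Int × String) : Lex (Int × Lex (Int × String)) :=
  toLex (-t.1, toLex (t.2.1, t.2.2))

theorem pvKey3_injective : Function.Injective pvKey3 := by
  intro a b h
  simp only [pvKey3, toLex_inj, Prod.mk.injEq] at h
  exact h.2.2

theorem pvPrecedes_eq (x y : Int × Int × String) :
    pvPrecedes x y = decide (pvKeyT x < pvKeyT y) := by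
  simp only [pvPrecedes, pvKeyT, Prod.Lex.lt_iff, ofLex_toLex]
  by_cases h1 : x.1 = y.1 <;> by_cases h2 : x.2.1 = y.2.1 <;>
    simp [h1, h2]

theorem pvBest_min (t : Int × Int × String) (rest : List (Int × Int × String)) :
    ∀ z ∈ t :: rest, pvKeyT (pvBest t rest) ≤ pvKeyT z := by
  induction rest generalizing t with
  | nil => intro z hz; simp at hz; simp [pvBest, hz]
  | cons y ys ih =>
    intro z hz
    have e : pvBest t (y :: ys) = pvBest (if pvPrecedes y t then y else t) ys := rfl
    rw [e]
    set t' := if pvPrecedes y t then y else t with ht'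
    have hle_t : pvKeyT t' ≤ pvKeyT t := by
      rw [ht']; split_ifs with h
      · exact le_of_lt (of_decide_eq_true ((pvPrecedes_eq y t) ▸ h))
      · exact le_refl _
    have hle_y : pvKeyT t' ≤ pvKeyT y := by
      rw [ht']; split_ifs with h
      · exact le_refl _
      · rw [pvPrecedes_eq] at h
        exact not_lt.mp (by simpa using h)
    rcases List.mem_cons.mp hz with rfl | hz
    · exact le_trans (ih t' t' (List.mem_cons_self)) hle_t
    rcases List.mem_cons.mp hz with rfl | hz
    · exact le_trans (ih t' t' (List.mem_cons_self)) hle_y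
    · exact ih t' z (List.mem_cons_of_mem _ hz)

theorem pvSelect_perm (items : List (Int × Int × String)) :
    (pvSelect items).Perm (items.map (fun t => t.2.2)) := by
  induction items using pvSelect.induct with
  | case1 => simp [pvSelect]
  | case2 t rest best ih =>
    rw [pvSelect]
    have hmem : best ∈ t :: rest := pvBest_mem t rest
    have hperm : (t :: rest).Perm (best :: (t :: rest).erase best) :=
      List.perm_cons_erase hmem
    have h2 := (hperm.map (fun t => t.2.2)).symm
    rw [List.map_cons] at h2
    exact (List.Perm.cons best.2.2 ih).trans h2

theorem pvSelect_pairwise (items : List (Int × Int × String))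
    (H : ∀ u ∈ items, pvKeyT u = pvKey3 u.2.2) :
    (pvSelect items).Pairwise (fun a b => pvKey3 a ≤ pvKey3 b) := by
  induction items using pvSelect.induct with
  | case1 => simp [pvSelect]
  | case2 t rest best ih =>
    rw [pvSelect]
    have hmem : best ∈ t :: rest := pvBest_mem t rest
    have Herase : ∀ u ∈ (t :: rest).erase best, pvKeyT u = pvKey3 u.2.2 :=
      fun u hu => H u (List.mem_of_mem_erase hu)
    refine List.pairwise_cons.mpr ⟨?_, ih Herase⟩
    intro z hz
    have hz' : z ∈ ((t :: rest).erase best).map (fun t => t.2.2) :=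
      (pvSelect_perm _).mem_iff.mp hz
    rcases List.mem_map.mp hz' with ⟨u, hu, rfl⟩
    have hmin := pvBest_min t rest u (List.mem_of_mem_erase hu)
    rw [H best hmem, Herase u hu] at hmin
    exact hmin

theorem pvSelect_eq_sorted (words : List String) :
    pvSelect (words.map pvDec) = PySem.List.sorted words pvKey3 := by
  refine PySem.List.eq_of_perm_of_pairwise_le_of_injective pvKey3 pvKey3_injective ?_ ?_ ?_
  · refine ((pvSelect_perm _).trans ?_).trans (PySem.List.sorted_perm _ _ _).symm
    rw [List.map_map]
    have h : ((fun t : Int × Int × String => t.2.2) ∘ pvDec) = id := rfl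
    rw [h, List.map_id]
  · exact pvSelect_pairwise _ (by rintro u hu; rcases List.mem_map.mp hu with ⟨w, _, rfl⟩; rfl)
  · exact PySem.List.sorted_pairwise _ _

-- sort(key=len, reverse=True) is the ascending stable sort under key -len.
theorem sorted_len_rev_eq (xs : List String) :
    PySem.List.sorted xs (fun x => PySem.Str.len x) true
      = PySem.List.sorted xs (fun x => -(PySem.Str.len x)) := by
  rw [PySem.List.sorted_rev_eq_foldl_insertBy, PySem.List.sorted_eq_foldl_insertBy]
  have : (fun (a b : String) => decide (PySem.Str.len b < PySem.Str.len a))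
      = fun a b => decide (-(PySem.Str.len a) < -(PySem.Str.len b)) := by
    funext a b; simp
  rw [this]

-- Stability: inserting x (which came after every element of ys in the original list,
-- witnessed by R y x) into a list ordered by the stable-lex relation keeps that order.
theorem insertBy_pairwise_stable {α κ : Type} [LinearOrder κ] (key : α → κ)
    (R : α → α → Prop) (x : α) (ys : List α)
    (h : ys.Pairwise (fun a b => key a < key b ∨ (key a = key b ∧ R a b)))
    (hx : ∀ y ∈ ys, R y x) :
    (PySem.List.insertBy (fun a b => decide (key a < key b)) x ys).Pairwise
      (fun a b => key a < key b ∨ (key a = key b ∧ R a b)) := by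
  induction ys with
  | nil => simp [PySem.List.insertBy]
  | cons y ys ih =>
    rcases List.pairwise_cons.mp h with ⟨hy, hys⟩
    by_cases hlt : key x < key y
    · rw [show PySem.List.insertBy (fun a b => decide (key a < key b)) x (y :: ys)
          = x :: y :: ys from by simp [PySem.List.insertBy, hlt]]
      refine List.pairwise_cons.mpr ⟨?_, h⟩
      intro z hz
      rcases List.mem_cons.mp hz with rfl | hz
      · exact Or.inl hlt
      · refine Or.inl (lt_of_lt_of_le hlt ?_)
        rcases hy z hz with h' | ⟨h', _⟩
        · exact le_of_lt h'
        · exact le_of_eq h'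
    · rw [show PySem.List.insertBy (fun a b => decide (key a < key b)) x (y :: ys)
          = y :: PySem.List.insertBy (fun a b => decide (key a < key b)) x ys from by
            simp [PySem.List.insertBy, hlt]]
      refine List.pairwise_cons.mpr ⟨?_, ih hys (fun z hz => hx z (List.mem_cons_of_mem y hz))⟩
      intro b hb
      rcases (PySem.List.mem_insertBy _ _ _ _).mp hb with rfl | hb
      · rcases lt_or_eq_of_le (le_of_not_gt hlt) with h' | h'
        · exact Or.inl h'
        · exact Or.inr ⟨h', hx y (List.mem_cons_self)⟩
      · exact hy b hb

theorem foldl_insertBy_pairwise_stable {α κ : Type} [LinearOrder κ] (key : α → κ)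
    (R : α → α → Prop) (xs acc : List α)
    (hxs : xs.Pairwise R)
    (hacc : acc.Pairwise (fun a b => key a < key b ∨ (key a = key b ∧ R a b)))
    (hcross : ∀ a ∈ acc, ∀ x ∈ xs, R a x) :
    (xs.foldl (fun acc x => PySem.List.insertBy (fun a b => decide (key a < key b)) x acc) acc).Pairwise
      (fun a b => key a < key b ∨ (key a = key b ∧ R a b)) := by
  induction hxs generalizing acc with
  | nil => exact hacc
  | @cons x xs hxr hxs' ih =>
    simp only [List.foldl_cons]
    refine ih _
      (insertBy_pairwise_stable key R x acc hacc
        (fun y hy => hcross y hy x (List.mem_cons_self))) ?_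
    intro a ha z hz
    rcases (PySem.List.mem_insertBy _ _ _ _).mp ha with rfl | ha
    · exact hxr z hz
    · exact hcross a ha z (List.mem_cons_of_mem x hz)

theorem sorted_pairwise_stable {α κ : Type} [LinearOrder κ] (key : α → κ)
    (R : α → α → Prop) (xs : List α) (hxs : xs.Pairwise R) :
    (PySem.List.sorted xs key).Pairwise
      (fun a b => key a < key b ∨ (key a = key b ∧ R a b)) := by
  rw [PySem.List.sorted_eq_foldl_insertBy]
  exact foldl_insertBy_pairwise_stable key R xs [] hxs (by simp) (by simp)

-- A's three stable sorts produce the (unique) arrangement ordered by the composite key.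
theorem chain_eq_sorted_key3 (wl : List String) :
    (PySem.List.sorted (PySem.List.sorted (PySem.List.sorted wl (fun x => x))
        (fun x => countVowel x)) (fun x => PySem.Str.len x) true)
      = PySem.List.sorted wl pvKey3 := by
  rw [sorted_len_rev_eq]
  have h1 : (PySem.List.sorted wl (fun x => x)).Pairwise (fun a b : String => a ≤ b) :=
    PySem.List.sorted_pairwise wl (fun x => x)
  have h2 := sorted_pairwise_stable (fun x => countVowel x) (fun a b : String => a ≤ b)
    (PySem.List.sorted wl (fun x => x)) h1
  have h3 := sorted_pairwise_stable (fun x => -(PySem.Str.len x))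
    (fun a b => countVowel a < countVowel b ∨ (countVowel a = countVowel b ∧ a ≤ b))
    _ h2
  have hL : (PySem.List.sorted (PySem.List.sorted (PySem.List.sorted wl (fun x => x))
      (fun x => countVowel x)) (fun x => -(PySem.Str.len x))).Pairwise
      (fun a b => pvKey3 a ≤ pvKey3 b) := by
    refine h3.imp ?_
    intro a b hab
    simp only [pvKey3, Prod.Lex.le_iff, ofLex_toLex]
    rcases hab with h' | ⟨h', h''⟩
    · exact Or.inl h'
    · exact Or.inr ⟨h', h''⟩
  have hR : (PySem.List.sorted wl pvKey3).Pairwise (fun a b => pvKey3 a ≤ pvKey3 b) :=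
    PySem.List.sorted_pairwise wl pvKey3
  have hperm : (PySem.List.sorted (PySem.List.sorted (PySem.List.sorted wl (fun x => x))
      (fun x => countVowel x)) (fun x => -(PySem.Str.len x))).Perm
      (PySem.List.sorted wl pvKey3) := by
    refine ((PySem.List.sorted_perm _ _ _).trans
      ((PySem.List.sorted_perm _ _ _).trans (PySem.List.sorted_perm _ _ _))).trans
      (PySem.List.sorted_perm _ _ _).symm
  exact PySem.List.eq_of_perm_of_pairwise_le_of_injective pvKey3 pvKey3_injective hperm hL hR

-- ===== VERDICT (by name: the statement is the Claim_ definition above) =====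
theorem transform_spec : Claim_equal_transform := by
  intro s _ hpre
  unfold Spec_transform transform transform_alt
  have hall : s.toList.all (fun i => pvValidWords.contains i) = true := hpre
  rw [if_pos hall, if_pos hall]
  cases hsp : PySem.Str.split? (PySem.Str.strip s) " " with
  | none =>
    simp only [hsp, List.map_nil, pvSelect]
    decide
  | some wl =>
    simp only [hsp]
    show PySem.Str.strip (PySem.Str.join " "
        (PySem.List.sorted (PySem.List.sorted (PySem.List.sorted wl (fun x => x))
          (fun x => countVowel x)) (fun x => PySem.Str.len x) true)) = _
    rw [chain_eq_sorted_key3, ← pvSelect_eq_sorted]
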